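-- pv_equiv track=rewrite | github.com/otniel55/siscong2 | secretario/views/privilegios.py | tiempoCompleto
-- ===== SOURCE A (Python) =====
-- def tiempoCompleto(meses):
--     mes=0
--     year=0
--     tiempo=""
--     if meses==0:
--         tiempo="Inicia este mes"
--     else:
--         for i in range(0,meses):
--             mes+=1
--             if mes==13:
--                 year+=1
--                 mes=1
--         if year>0:
--             tiempo=str(year)+" anio"
--             if year>1:
--                 tiempo+="s"
--             if meses>0:
--                 tiempo+=" y "+str(mes)+" mes"
--                 if mes>1:
--                     tiempo+="es"
--         else:
--             tiempo=str(mes)+" mes"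
--             if mes>1:
--                 tiempo+="es"
--     return tiempo
-- ===== SOURCE B (Python) =====
-- def tiempoCompleto(meses):
--     if meses == 0:
--         return "Inicia este mes"
--     year, mes = divmod(meses - 1, 12)
--     mes += 1
--     y_part = "" if year <= 0 else str(year) + " anio" + ("s" if year > 1 else "") + " y "
--     return y_part + str(mes) + " mes" + ("es" if mes > 1 else "")
-- ===== Notes on version B (the rewrite author's own statement) =====
-- stated objective: faster
-- what changed: Replaced the month-counting loop over range(meses) with a single divmod(meses-1, 12) closed form.
-- outside the precondition, e.g. on tiempoCompleto(-5): A returns '0 mes', B returns '7 meses'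
import Mathlib
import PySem

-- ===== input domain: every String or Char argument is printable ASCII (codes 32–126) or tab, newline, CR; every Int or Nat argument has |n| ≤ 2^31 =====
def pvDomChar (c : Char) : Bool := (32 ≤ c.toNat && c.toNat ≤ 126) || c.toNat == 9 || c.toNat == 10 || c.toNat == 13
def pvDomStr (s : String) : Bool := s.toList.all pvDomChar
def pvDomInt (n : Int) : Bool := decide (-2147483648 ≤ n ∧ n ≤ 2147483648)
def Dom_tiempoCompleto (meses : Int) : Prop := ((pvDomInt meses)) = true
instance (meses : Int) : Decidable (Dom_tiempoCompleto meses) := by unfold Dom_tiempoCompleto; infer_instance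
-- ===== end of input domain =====

-- B replaces A's month-counting loop with a divmod(meses-1,12) closed form (asymptotically faster).


-- ===== PORT A =====
-- one iteration of A's for-loop body over the state (mes, year)
def tcStep (s : Int × Int) (_i : Int) : Int × Int :=
  let mes := s.1 + 1
  if mes == 13 then (1, s.2 + 1) else (mes, s.2)

def tiempoCompleto (meses : Int) : String :=
  if meses == 0 then "Inicia este mes"
  else
    let st := (PySem.List.pyRange 0 meses 1).foldl tcStep (0, 0)
    let mes := st.1
    let year := st.2
    if year > 0 then
      let t := PySem.Int.toStr year ++ " anio"
      let t := if year > 1 then t ++ "s" else t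
      if meses > 0 then
        let t := t ++ " y " ++ PySem.Int.toStr mes ++ " mes"
        if mes > 1 then t ++ "es" else t
      else t
    else
      let t := PySem.Int.toStr mes ++ " mes"
      if mes > 1 then t ++ "es" else t

-- ===== PORT B =====
def tiempoCompleto_alt (meses : Int) : String :=
  if meses == 0 then "Inicia este mes"
  else
    let year := PySem.Int.floordiv (meses - 1) 12
    let mes := PySem.Int.mod (meses - 1) 12 + 1
    let yPart := if year ≤ 0 then "" else
      PySem.Int.toStr year ++ " anio" ++ (if year > 1 then "s" else "") ++ " y "
    yPart ++ PySem.Int.toStr mes ++ " mes" ++ (if mes > 1 then "es" else "")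

-- ===== PRECONDITION & SPEC =====
-- Pre_ excludes negative meses: there A's leftover loop state yields "0 mes" while B's
-- divmod yields another string; a negative month count is an unspecified corner where
-- neither value is the one a caller could rely on.
def Pre_tiempoCompleto (meses : Int) : Prop := 0 ≤ meses
instance (meses : Int) : Decidable (Pre_tiempoCompleto meses) := by unfold Pre_tiempoCompleto; infer_instance
def pvWitness_tiempoCompleto : Int := (14)
def Spec_tiempoCompleto (meses : Int) (out : String) : Prop := out = tiempoCompleto_alt meses
instance (meses : Int) (out : String) : Decidable (Spec_tiempoCompleto meses out) := by unfold Spec_tiempoCompleto; infer_instance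

-- ===== CLAIM (what is proved, stated in full; the proofs are below) =====
def Claim_equal_tiempoCompleto : Prop := ∀ (meses : Int), Dom_tiempoCompleto meses → Pre_tiempoCompleto meses → Spec_tiempoCompleto meses (tiempoCompleto meses)

-- ===== LEMMAS AND PROOFS =====

-- the loop's effect depends only on the number of iterations
def tcIterFrom (s : Int × Int) : Nat → Int × Int
  | 0 => s
  | n + 1 => tcStep (tcIterFrom s n) 0

lemma tcIterFrom_shift (s : Int × Int) (n : Nat) :
    tcIterFrom (tcStep s 0) n = tcStep (tcIterFrom s n) 0 := by
  induction n with
  | zero => rfl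
  | succ m ih => show tcStep _ 0 = _; rw [ih]; rfl

lemma foldl_tcStep (l : List Int) (s : Int × Int) :
    l.foldl tcStep s = tcIterFrom s l.length := by
  induction l generalizing s with
  | nil => rfl
  | cons a t ih =>
      have ha : tcStep s a = tcStep s 0 := rfl
      simp only [List.foldl_cons, List.length_cons, ih, ha, tcIterFrom_shift]
      rfl

lemma tcIter_closed (n : Nat) (hn : 0 < n) :
    tcIterFrom (0, 0) n = (((n : Int) - 1) % 12 + 1, ((n : Int) - 1) / 12) := by
  induction n with
  | zero => omega
  | succ m ih =>
      by_cases hm : 0 < m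
      · have hcl := ih hm
        show tcStep (tcIterFrom (0, 0) m) 0 = _
        rw [hcl]
        unfold tcStep
        by_cases h12 : ((m : Int) - 1) % 12 + 1 + 1 = 13
        · simp only [h12, beq_self_eq_true, if_true, Prod.mk.injEq]
          constructor <;> push_cast <;> omega
        · have hne : ((((m : Int) - 1) % 12 + 1, ((m : Int) - 1) / 12).1 + 1 == 13) = false := by
            simpa using h12
          simp only [hne, Bool.false_eq_true, if_false, Prod.mk.injEq]
          constructor <;> push_cast <;> omega
      · have : m = 0 := by omega
        subst this; decide

lemma tcLoop_closed (meses : Int) (h : 0 < meses) :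
    (PySem.List.pyRange 0 meses 1).foldl tcStep (0, 0)
      = ((meses - 1) % 12 + 1, (meses - 1) / 12) := by
  rw [foldl_tcStep, PySem.List.length_pyRange_one]
  have hlen : 0 < (meses - 0).toNat := by omega
  have := tcIter_closed ((meses - 0).toNat) hlen
  have hcast : (((meses - 0).toNat : Int)) = meses := by omega
  rw [hcast] at this
  exact this

-- ===== VERDICT (by name: the statement is the Claim_ definition above) =====
theorem tiempoCompleto_spec : Claim_equal_tiempoCompleto := by
  intro meses _ hpre
  unfold Spec_tiempoCompleto tiempoCompleto tiempoCompleto_alt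
  by_cases h0 : meses = 0
  · simp [h0]
  · have hpos : 0 < meses := lt_of_le_of_ne hpre (Ne.symm h0)
    have h0' : (meses == 0) = false := by simp; omega
    simp only [h0', Bool.false_eq_true, if_false]
    rw [tcLoop_closed meses hpos]
    have hfd : PySem.Int.floordiv (meses - 1) 12 = (meses - 1) / 12 :=
      PySem.Int.floordiv_eq_ediv_of_pos (by norm_num)
    have hmd : PySem.Int.mod (meses - 1) 12 = (meses - 1) % 12 :=
      PySem.Int.mod_eq_emod_of_pos (by norm_num)
    rw [hfd, hmd]
    simp only
    by_cases hy : (meses - 1) / 12 > 0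
    · have hy' : ¬ ((meses - 1) / 12 ≤ 0) := by omega
      simp only [if_pos hy, if_neg hy', if_pos hpos]
      by_cases hy1 : (meses - 1) / 12 > 1 <;>
        by_cases hm1 : (meses - 1) % 12 + 1 > 1 <;>
          simp [hy1, hm1, String.append_assoc]
    · have hy' : (meses - 1) / 12 ≤ 0 := by omega
      simp only [if_neg hy, if_pos hy']
      by_cases hm1 : (meses - 1) % 12 + 1 > 1 <;>
        simp [hm1, String.append_assoc]
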